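-- pv_equiv track=rewrite | github.com/radoslawrolka/Introduction_to_Computer_Science_Course | zestaw_2/z8_d.py | suma_podciagu_fib
-- ===== SOURCE A (Python) =====
-- def suma_podciagu_fib(sum_to_find):
--     curr_sum = 1
--
--     smallest, second_smallest = 1, 1
--     second_largest, largest = 0, 1
--
--     while smallest <= sum_to_find:
--         second_largest, largest = largest, second_largest + largest
--         curr_sum += largest
--         if curr_sum == sum_to_find:
--             return True
--         while curr_sum > sum_to_find:
--             curr_sum -= smallest
--             smallest, second_smallest = second_smallest, smallest + second_smallest
--             if curr_sum == sum_to_find: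
--                 return True
--     return False
-- ===== SOURCE B (Python) =====
-- def suma_podciagu_fib(sum_to_find):
--     # Build every Fibonacci number (1, 1, 2, 3, 5, ...) not exceeding the target,
--     # then brute-force all contiguous windows of that list.
--     fibs = []
--     a, b = 1, 1
--     while a <= sum_to_find:
--         fibs.append(a)
--         a, b = b, a + b
--     for i in range(len(fibs)):
--         s = 0
--         for j in range(i, len(fibs)):
--             s += fibs[j]
--             if s == sum_to_find:
--                 return True
--     return False
-- ===== Notes on version B (the rewrite author's own statement) =====
-- stated objective: alternative
-- what changed: A slides a single window over the Fibonacci stream, growing on the right and shrinking on the left; B instead materialises the list of Fibonacci numbers <= the target once and then brute-forces every contiguous window of that list with a nested double loop.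
import Mathlib
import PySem

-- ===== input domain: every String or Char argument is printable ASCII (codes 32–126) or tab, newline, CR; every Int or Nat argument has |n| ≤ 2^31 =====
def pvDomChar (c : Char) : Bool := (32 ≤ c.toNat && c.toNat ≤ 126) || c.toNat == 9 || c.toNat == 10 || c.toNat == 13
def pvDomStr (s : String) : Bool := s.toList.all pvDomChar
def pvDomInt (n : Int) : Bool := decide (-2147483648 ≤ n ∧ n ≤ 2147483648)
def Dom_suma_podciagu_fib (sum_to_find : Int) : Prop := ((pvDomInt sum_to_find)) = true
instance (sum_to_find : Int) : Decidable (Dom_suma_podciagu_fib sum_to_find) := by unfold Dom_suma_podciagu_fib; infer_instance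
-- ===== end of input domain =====

-- B replaces A's sliding window over the Fibonacci stream by building the list of
-- Fibonacci numbers ≤ target once and brute-forcing all contiguous windows (objective: alternative).

-- ===== PORT A =====
-- inner `while curr_sum > sum_to_find` loop of A; the fuel argument is only a
-- totality guard (the caller passes enough fuel for the loop to always finish).
def pvShrink (fuel : Nat) (target curr_sum smallest second_smallest : Int) :
    Bool × Int × Int × Int :=
  match fuel with
  | 0 => (false, curr_sum, smallest, second_smallest)
  | f+1 =>
    if curr_sum > target then
      let cs := curr_sum - smallest
      let sm := second_smallest
      let ssm := smallest + second_smallest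
      if cs = target then (true, cs, sm, ssm) else pvShrink f target cs sm ssm
    else (false, curr_sum, smallest, second_smallest)

-- outer `while smallest <= sum_to_find` loop of A; fuel is a totality guard only.
def pvLoopA (fuel : Nat) (target curr_sum smallest second_smallest second_largest largest : Int) : Bool :=
  match fuel with
  | 0 => false
  | f+1 =>
    if smallest ≤ target then
      let sl := largest
      let lg := second_largest + largest
      let cs := curr_sum + lg
      if cs = target then true
      else
        match pvShrink ((cs - target).toNat + 1) target cs smallest second_smallest with
        | (true, _, _, _) => true
        | (false, cs', sm', ssm') => pvLoopA f target cs' sm' ssm' sl lg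
    else false

def suma_podciagu_fib (sum_to_find : Int) : Bool :=
  pvLoopA (sum_to_find.toNat + 3) sum_to_find 1 1 1 0 1

-- ===== PORT B =====
-- `while a <= sum_to_find` loop of B collecting the Fibonacci numbers ≤ target
-- (fuel is a totality guard only; the caller passes enough).
def pvFibsLE (fuel : Nat) (target a b : Int) : List Int :=
  match fuel with
  | 0 => []
  | f+1 => if a ≤ target then a :: pvFibsLE f target b (a + b) else []

-- B's inner `for j` loop: accumulate the window sum over the suffix.
def pvWinB (target : Int) (s : Int) : List Int → Bool
  | [] => false
  | x :: xs => if s + x = target then true else pvWinB target (s + x) xs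

-- B's outer `for i` loop: try every start position.
def pvStartsB (target : Int) : List Int → Bool
  | [] => false
  | x :: xs => if pvWinB target 0 (x :: xs) then true else pvStartsB target xs

def suma_podciagu_fib_alt (sum_to_find : Int) : Bool :=
  pvStartsB sum_to_find (pvFibsLE (sum_to_find.toNat + 1) sum_to_find 1 1)

-- ===== PRECONDITION & SPEC =====
def Spec_suma_podciagu_fib (sum_to_find : Int) (out : Bool) : Prop := out = suma_podciagu_fib_alt sum_to_find
instance (sum_to_find : Int) (out : Bool) : Decidable (Spec_suma_podciagu_fib sum_to_find out) := by unfold Spec_suma_podciagu_fib; infer_instance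

-- ===== CLAIM (what is proved, stated in full; the proofs are below) =====
def Claim_equal_suma_podciagu_fib : Prop := ∀ (sum_to_find : Int), Dom_suma_podciagu_fib sum_to_find → Spec_suma_podciagu_fib sum_to_find (suma_podciagu_fib sum_to_find)

-- ===== LEMMAS AND PROOFS =====

-- pvW s l = Fib s + Fib (s+1) + … + Fib l  (0 if s > l), the sum of a window of
-- consecutive Fibonacci numbers; both programs decide `∃ window with sum = n`.
def pvW (s l : Nat) : Nat :=
  if s ≤ l then Nat.fib s + pvW (s+1) l else 0
termination_by l + 1 - s
decreasing_by omega

theorem pvW_of_gt {s l : Nat} (h : l < s) : pvW s l = 0 := by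
  rw [pvW, if_neg (by omega)]

theorem pvW_step {s l : Nat} (h : s ≤ l) : pvW s l = Nat.fib s + pvW (s+1) l := by
  rw [pvW, if_pos h]

theorem pvW_self (l : Nat) : pvW l l = Nat.fib l := by
  rw [pvW_step (le_refl l), pvW_of_gt (by omega)]
  omega

theorem pvW_succ_right : ∀ (d s l : Nat), l + 1 - s ≤ d → s ≤ l + 1 →
    pvW s (l+1) = pvW s l + Nat.fib (l+1) := by
  intro d
  induction d with
  | zero =>
    intro s l hd hs
    have hsl : s = l + 1 := by omega
    subst hsl
    rw [pvW_self, pvW_of_gt (by omega)]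
    omega
  | succ d ih =>
    intro s l hd hs
    by_cases hsl : s ≤ l
    · rw [pvW_step (by omega), pvW_step hsl, ih (s+1) l (by omega) (by omega)]
      omega
    · have hsl' : s = l + 1 := by omega
      subst hsl'
      rw [pvW_self, pvW_of_gt (by omega)]
      omega

theorem pvW_succ_right' {s l : Nat} (hs : s ≤ l + 1) :
    pvW s (l+1) = pvW s l + Nat.fib (l+1) :=
  pvW_succ_right (l + 1 - s) s l (le_refl _) hs

theorem pvW_le_right {a l : Nat} : ∀ b, l ≤ b → pvW a l ≤ pvW a b := by
  intro b
  induction b with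
  | zero =>
    intro h
    have hl0 : l = 0 := by omega
    subst hl0
    exact le_refl _
  | succ b ih =>
    intro h
    by_cases hlb : l ≤ b
    · by_cases hab : a ≤ b + 1
      · rw [pvW_succ_right' hab]; exact le_trans (ih hlb) (Nat.le_add_right _ _)
      · rw [pvW_of_gt (show b + 1 < a by omega), pvW_of_gt (show l < a by omega)]
    · have : l = b + 1 := by omega
      simp [this]

theorem fib_le_pvW_right : ∀ (d s l : Nat), l - s ≤ d → s ≤ l → Nat.fib l ≤ pvW s l := by
  intro d
  induction d with
  | zero =>
    intro s l hd hs
    have : s = l := by omega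
    subst this
    rw [pvW_self]
  | succ d ih =>
    intro s l hd hs
    by_cases hsl : s = l
    · subst hsl; rw [pvW_self]
    · rw [pvW_step hs]
      exact le_trans (ih (s+1) l (by omega) (by omega)) (Nat.le_add_left _ _)

theorem fib_le_pvW_left {s l : Nat} (h : s ≤ l) : Nat.fib s ≤ pvW s l := by
  rw [pvW_step h]; exact Nat.le_add_right _ _

theorem pvW_anti {s l : Nat} : ∀ c, s ≤ c → pvW c l ≤ pvW s l := by
  intro c hc
  induction c with
  | zero =>
    have hs0 : s = 0 := by omega
    subst hs0
    exact le_refl _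
  | succ c ih =>
    by_cases hsc : s ≤ c
    · have hstep := ih hsc
      by_cases hcl : c ≤ l
      · calc pvW (c+1) l ≤ Nat.fib c + pvW (c+1) l := Nat.le_add_left _ _
          _ = pvW c l := (pvW_step hcl).symm
          _ ≤ pvW s l := hstep
      · rw [pvW_of_gt (show l < c + 1 by omega)]; exact Nat.zero_le _
    · have hs1 : s = c + 1 := by omega
      subst hs1; exact le_refl _

theorem pv_lt_fib_add_two : ∀ m : Nat, m < Nat.fib (m + 2) := by
  intro m
  induction m with
  | zero => simp
  | succ m ih =>
    have h1 : 1 ≤ Nat.fib (m + 1) := Nat.fib_pos.2 (by omega)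
    have h2 : Nat.fib (m + 3) = Nat.fib (m + 1) + Nat.fib (m + 2) := Nat.fib_add_two
    show m + 1 < Nat.fib (m + 3)
    omega

-- the common specification: n is the sum of a window Fib a + … + Fib b, 1 ≤ a ≤ b
def pvHasWin (n : Int) : Prop := ∃ a b : Nat, 1 ≤ a ∧ a ≤ b ∧ (pvW a b : Int) = n
-- the same excluding the window (1,1) (A never tests it; Fib 1 = Fib 2 makes it redundant)
def pvHasWin' (n : Int) : Prop := ∃ a b : Nat, 1 ≤ a ∧ a ≤ b ∧ ¬(a = 1 ∧ b = 1) ∧ (pvW a b : Int) = n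

theorem pvHasWin_iff (n : Int) : pvHasWin n ↔ pvHasWin' n := by
  constructor
  · rintro ⟨a, b, ha, hab, hW⟩
    by_cases h11 : a = 1 ∧ b = 1
    · refine ⟨2, 2, by omega, le_refl _, by omega, ?_⟩
      obtain ⟨rfl, rfl⟩ := h11
      rw [pvW_self] at hW ⊢
      simpa using hW
    · exact ⟨a, b, ha, hab, h11, hW⟩
  · rintro ⟨a, b, ha, hab, _, hW⟩
    exact ⟨a, b, ha, hab, hW⟩

theorem pvNoWin {n : Int} {s l : Nat} (_hs : 1 ≤ s)
    (H3 : ∀ a b : Nat, 1 ≤ a → a ≤ b → b ≤ l → ¬(a = 1 ∧ b = 1) → (pvW a b : Int) ≠ n)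
    (H4 : ∀ a : Nat, 1 ≤ a → a < s → n < (pvW a l : Int))
    (hfs : n < (Nat.fib s : Int)) : ¬ pvHasWin' n := by
  rintro ⟨a, b, ha, hab, hne, hW⟩
  by_cases hc : a < s
  · by_cases hbl : b ≤ l
    · exact H3 a b ha hab hbl hne hW
    · have h1 := H4 a ha hc
      have h2 : pvW a l ≤ pvW a b := pvW_le_right b (by omega)
      have h2' : (pvW a l : Int) ≤ (pvW a b : Int) := by exact_mod_cast h2
      omega
  · have h1 : Nat.fib s ≤ Nat.fib a := Nat.fib_mono (by omega)
    have h2 : Nat.fib a ≤ Nat.fib b := Nat.fib_mono hab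
    have h3 : Nat.fib b ≤ pvW a b := fib_le_pvW_right (b - a) a b (le_refl _) hab
    have : (Nat.fib s : Int) ≤ (pvW a b : Int) := by exact_mod_cast le_trans h1 (le_trans h2 h3)
    omega

theorem pvShrink_succ (f : Nat) (n cs sm ssm : Int) :
    pvShrink (f+1) n cs sm ssm =
      if cs > n then
        (if cs - sm = n then (true, cs - sm, ssm, sm + ssm)
         else pvShrink f n (cs - sm) ssm (sm + ssm))
      else (false, cs, sm, ssm) := rfl

theorem pvShrink_spec : ∀ (fuel : Nat) (n : Int) (l s : Nat),
    1 ≤ s → s ≤ l + 1 → 1 ≤ n →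
    (pvW s l : Int) - n < fuel → (pvW s l : Int) ≠ n →
    (∃ r₂ r₃ r₄, pvShrink fuel n (pvW s l) (Nat.fib s) (Nat.fib (s+1)) = (true, r₂, r₃, r₄) ∧
        ∃ a, s < a ∧ a ≤ l + 1 ∧ (pvW a l : Int) = n)
    ∨ (∃ a, s ≤ a ∧ a ≤ l + 1 ∧
        pvShrink fuel n (pvW s l) (Nat.fib s) (Nat.fib (s+1)) =
          (false, (pvW a l : Int), (Nat.fib a : Int), (Nat.fib (a+1) : Int)) ∧
        (pvW a l : Int) ≤ n ∧
        (∀ c, s ≤ c → c < a → n < (pvW c l : Int)) ∧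
        (∀ c, s ≤ c → (pvW c l : Int) ≠ n)) := by
  intro fuel
  induction fuel with
  | zero =>
    intro n l s hs hsl hn hfuel hne
    right
    refine ⟨s, le_refl _, hsl, rfl, by omega, fun c h1 h2 => absurd h2 (by omega), ?_⟩
    intro c hc
    have h := pvW_anti (s := s) (l := l) c hc
    have h' : (pvW c l : Int) ≤ (pvW s l : Int) := by exact_mod_cast h
    omega
  | succ f ih =>
    intro n l s hs hsl hn hfuel hne
    rw [pvShrink_succ]
    by_cases hgt : (pvW s l : Int) > n
    · have hsl2 : s ≤ l := by
        by_contra hcon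
        have h0 : pvW s l = 0 := pvW_of_gt (by omega)
        rw [h0] at hgt
        simp at hgt
        omega
      have hstep : (pvW s l : Int) = (Nat.fib s : Int) + (pvW (s+1) l : Int) := by
        exact_mod_cast congrArg (Nat.cast : Nat → Int) (pvW_step hsl2)
      have hcs : (pvW s l : Int) - (Nat.fib s : Int) = (pvW (s+1) l : Int) := by omega
      have hfib : (Nat.fib s : Int) + (Nat.fib (s+1) : Int) = (Nat.fib (s+2) : Int) := by
        exact_mod_cast congrArg (Nat.cast : Nat → Int) (Nat.fib_add_two (n := s)).symm
      have hfpos : (1 : Int) ≤ (Nat.fib s : Int) := by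
        exact_mod_cast Nat.fib_pos.2 (by omega)
      rw [if_pos hgt, hcs, hfib]
      by_cases heq : (pvW (s+1) l : Int) = n
      · rw [if_pos heq]
        exact Or.inl ⟨_, _, _, rfl, s+1, by omega, by omega, heq⟩
      · rw [if_neg heq]
        have hfuel' : (pvW (s+1) l : Int) - n < f := by omega
        rcases ih n l (s+1) (by omega) (by omega) hn hfuel' heq with
          ⟨r₂, r₃, r₄, heqS, a, h1, h2, h3⟩ | ⟨a, h1, h2, heqS, h4, h5, h6⟩
        · exact Or.inl ⟨r₂, r₃, r₄, heqS, a, by omega, h2, h3⟩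
        · refine Or.inr ⟨a, by omega, h2, heqS, h4, ?_, ?_⟩
          · intro c hc1 hc2
            rcases Nat.eq_or_lt_of_le hc1 with rfl | hlt
            · exact hgt
            · exact h5 c (by omega) hc2
          · intro c hc1
            rcases Nat.eq_or_lt_of_le hc1 with rfl | hlt
            · exact hne
            · exact h6 c (by omega)
    · rw [if_neg hgt]
      rw [not_lt] at hgt
      refine Or.inr ⟨s, le_refl _, hsl, rfl, hgt, fun c h1 h2 => absurd h2 (by omega), ?_⟩
      intro c hc heq'
      have h := pvW_anti (s := s) (l := l) c hc
      have h' : (pvW c l : Int) ≤ (pvW s l : Int) := by exact_mod_cast h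
      omega

theorem pvLoopA_succ (f : Nat) (n c sm ssm s2 lg : Int) :
    pvLoopA (f+1) n c sm ssm s2 lg =
      if sm ≤ n then
        (if c + (s2 + lg) = n then true
         else match pvShrink ((c + (s2 + lg) - n).toNat + 1) n (c + (s2 + lg)) sm ssm with
           | (true, _, _, _) => true
           | (false, c', sm', ssm') => pvLoopA f n c' sm' ssm' lg (s2 + lg))
      else false := rfl

theorem pvLoopA_spec : ∀ (fuel : Nat) (n : Int) (s l : Nat),
    1 ≤ s → 1 ≤ l → s ≤ l + 1 → 1 ≤ n →
    (pvW s l : Int) ≤ n →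
    (∀ a b : Nat, 1 ≤ a → a ≤ b → b ≤ l → ¬(a = 1 ∧ b = 1) → (pvW a b : Int) ≠ n) →
    (∀ a : Nat, 1 ≤ a → a < s → n < (pvW a l : Int)) →
    n < (Nat.fib (l + fuel) : Int) →
    (pvLoopA fuel n (pvW s l) (Nat.fib s) (Nat.fib (s+1)) (Nat.fib (l-1)) (Nat.fib l) = true
      ↔ pvHasWin' n) := by
  intro fuel
  induction fuel with
  | zero =>
    intro n s l hs hl hsl hn h2 H3 H4 hfuel
    have hfl : n < (Nat.fib l : Int) := by simpa using hfuel
    have hseq : s = l + 1 := by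
      by_contra hcon
      have hsl2 : s ≤ l := by omega
      have h := fib_le_pvW_right (l - s) s l (le_refl _) hsl2
      have h' : (Nat.fib l : Int) ≤ (pvW s l : Int) := by exact_mod_cast h
      omega
    have hfs : n < (Nat.fib s : Int) := by
      have hm : Nat.fib l ≤ Nat.fib s := Nat.fib_mono (by omega)
      have hm' : (Nat.fib l : Int) ≤ (Nat.fib s : Int) := by exact_mod_cast hm
      omega
    exact iff_of_false (by simp [pvLoopA]) (pvNoWin hs H3 H4 hfs)
  | succ f ih =>
    intro n s l hs hl hsl hn h2 H3 H4 hfuel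
    rw [pvLoopA_succ]
    by_cases hsm : (Nat.fib s : Int) ≤ n
    · rw [if_pos hsm]
      have hlg : (Nat.fib (l-1) : Int) + (Nat.fib l : Int) = (Nat.fib (l+1) : Int) := by
        obtain ⟨m, rfl⟩ : ∃ m, l = m + 1 := ⟨l - 1, by omega⟩
        simp only [Nat.add_sub_cancel]
        exact_mod_cast congrArg (Nat.cast : Nat → Int) (Nat.fib_add_two (n := m)).symm
      rw [hlg]
      have hcs : (pvW s l : Int) + (Nat.fib (l+1) : Int) = (pvW s (l+1) : Int) := by
        have h := pvW_succ_right' (s := s) (l := l) hsl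
        have h' : (pvW s (l+1) : Int) = (pvW s l : Int) + (Nat.fib (l+1) : Int) := by
          exact_mod_cast congrArg (Nat.cast : Nat → Int) h
        omega
      rw [hcs]
      by_cases hceq : (pvW s (l+1) : Int) = n
      · rw [if_pos hceq]
        exact iff_of_true rfl ⟨s, l+1, hs, by omega, by omega, hceq⟩
      · rw [if_neg hceq]
        have hfu : (pvW s (l+1) : Int) - n < (((pvW s (l+1) : Int) - n).toNat + 1 : Nat) := by
          have h := Int.self_le_toNat ((pvW s (l+1) : Int) - n)
          push_cast
          omega
        rcases pvShrink_spec (((pvW s (l+1) : Int) - n).toNat + 1) n (l+1) s hs (by omega) hn hfu hceq with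
          ⟨r₂, r₃, r₄, heqS, a, h1a, h2a, h3a⟩ | ⟨a, h1a, h2a, heqS, h4a, h5a, h6a⟩
        · rw [heqS]
          have ha1 : a ≤ l + 1 := by
            by_contra hcon
            have ha2 : a = l + 2 := by omega
            rw [ha2, pvW_of_gt (by omega)] at h3a
            simp at h3a
            omega
          exact iff_of_true rfl ⟨a, l+1, by omega, ha1, by omega, h3a⟩
        · rw [heqS]
          show pvLoopA f n (pvW a (l+1) : Int) (Nat.fib a : Int) (Nat.fib (a+1) : Int)
                (Nat.fib l : Int) (Nat.fib (l+1) : Int) = true ↔ pvHasWin' n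
          have H3' : ∀ a' b' : Nat, 1 ≤ a' → a' ≤ b' → b' ≤ l + 1 → ¬(a' = 1 ∧ b' = 1) →
              (pvW a' b' : Int) ≠ n := by
            intro a' b' ha' hab' hbl' hne'
            by_cases hb : b' ≤ l
            · exact H3 a' b' ha' hab' hb hne'
            · have hb1 : b' = l + 1 := by omega
              subst hb1
              by_cases has : s ≤ a'
              · exact h6a a' has
              · have hlt := H4 a' ha' (by omega)
                have hle : pvW a' l ≤ pvW a' (l+1) := pvW_le_right (l+1) (by omega)
                have hle' : (pvW a' l : Int) ≤ (pvW a' (l+1) : Int) := by exact_mod_cast hle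
                omega
          have H4' : ∀ c : Nat, 1 ≤ c → c < a → n < (pvW c (l+1) : Int) := by
            intro c hc1 hc2
            by_cases hsc : s ≤ c
            · exact h5a c hsc hc2
            · have hlt := H4 c hc1 (by omega)
              have hle : pvW c l ≤ pvW c (l+1) := pvW_le_right (l+1) (by omega)
              have hle' : (pvW c l : Int) ≤ (pvW c (l+1) : Int) := by exact_mod_cast hle
              omega
          have hfuel' : n < (Nat.fib (l + 1 + f) : Int) := by
            have hfe : l + (f + 1) = l + 1 + f := by omega
            rw [hfe] at hfuel
            exact hfuel
          exact ih n a (l+1) (by omega) (by omega) (by omega) hn h4a H3' H4' hfuel'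
    · rw [if_neg hsm]
      exact iff_of_false (by simp) (pvNoWin hs H3 H4 (by omega))

theorem pvA_iff (n : Int) : (suma_podciagu_fib n = true) ↔ pvHasWin' n := by
  by_cases hn : 1 ≤ n
  · have hW11 : (pvW 1 1 : Int) = 1 := by
      rw [pvW_self]
      norm_num
    have hfuel : n < (Nat.fib (1 + (n.toNat + 3)) : Int) := by
      have h1 : (n.toNat : Int) < (Nat.fib (n.toNat + 2) : Int) := by
        exact_mod_cast pv_lt_fib_add_two n.toNat
      have h2 : Nat.fib (n.toNat + 2) ≤ Nat.fib (1 + (n.toNat + 3)) := Nat.fib_mono (by omega)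
      have h2' : (Nat.fib (n.toNat + 2) : Int) ≤ (Nat.fib (1 + (n.toNat + 3)) : Int) := by
        exact_mod_cast h2
      have h3 := Int.self_le_toNat n
      omega
    have key := pvLoopA_spec (n.toNat + 3) n 1 1 (le_refl _) (le_refl _) (by omega) hn
      (by rw [hW11]; exact hn)
      (fun a b ha hab hbl hne => absurd (by omega : a = 1 ∧ b = 1) hne)
      (fun a ha hlt => absurd hlt (by omega))
      hfuel
    rw [hW11] at key
    have e1 : ((Nat.fib 1 : Nat) : Int) = 1 := by norm_num
    have e2 : ((Nat.fib (1+1) : Nat) : Int) = 1 := by norm_num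
    have e3 : ((Nat.fib (1-1) : Nat) : Int) = 0 := by norm_num
    rw [e1, e2, e3] at key
    exact key
  · have hF : suma_podciagu_fib n = false := by
      unfold suma_podciagu_fib
      have h0 : n.toNat = 0 := Int.toNat_of_nonpos (by omega)
      rw [h0, show (0:Nat) + 3 = 2 + 1 from rfl, pvLoopA_succ, if_neg (by omega : ¬(1:Int) ≤ n)]
    rw [hF]
    refine iff_of_false (by simp) ?_
    rintro ⟨a, b, ha, hab, hne, hW⟩
    have h1 : 0 < Nat.fib a := Nat.fib_pos.2 (by omega)
    have h2 : Nat.fib a ≤ pvW a b := fib_le_pvW_left hab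
    have h3 : (1 : Int) ≤ (pvW a b : Int) := by exact_mod_cast le_trans h1 h2
    omega

def pvFibList (a k : Nat) : List Int := (List.range' a k).map (fun j => ((Nat.fib j : Nat) : Int))

theorem pvFibList_succ (a k : Nat) :
    pvFibList a (k+1) = ((Nat.fib a : Nat) : Int) :: pvFibList (a+1) k := by
  simp [pvFibList, List.range'_succ]

theorem pvWinB_spec : ∀ (k a : Nat) (c n : Int),
    (pvWinB n c (pvFibList a k) = true) ↔ ∃ j, j < k ∧ c + (pvW a (a+j) : Int) = n := by
  intro k
  induction k with
  | zero =>
    intro a c n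
    refine iff_of_false (by simp [pvFibList, pvWinB]) ?_
    rintro ⟨j, hj, _⟩
    omega
  | succ k ih =>
    intro a c n
    rw [pvFibList_succ]
    simp only [pvWinB]
    by_cases heq : c + (Nat.fib a : Int) = n
    · rw [if_pos heq]
      refine iff_of_true rfl ⟨0, by omega, ?_⟩
      rw [show a + 0 = a from rfl, pvW_self]
      exact heq
    · rw [if_neg heq]
      rw [ih (a+1) (c + (Nat.fib a : Int)) n]
      constructor
      · rintro ⟨j, hj, hsum⟩
        refine ⟨j+1, by omega, ?_⟩
        have hc : (pvW a (a + (j+1)) : Int)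
            = (Nat.fib a : Int) + (pvW (a+1) (a+1+j) : Int) := by
          rw [show a + (j+1) = a + 1 + j from by omega]
          exact_mod_cast congrArg (Nat.cast : Nat -> Int) (pvW_step (by omega))
        omega
      · rintro ⟨j, hj, hsum⟩
        rcases j with _ | j
        · rw [show a + 0 = a from rfl, pvW_self] at hsum
          exact absurd hsum heq
        · refine ⟨j, by omega, ?_⟩
          have hc : (pvW a (a + (j+1)) : Int)
              = (Nat.fib a : Int) + (pvW (a+1) (a+1+j) : Int) := by
            rw [show a + (j+1) = a + 1 + j from by omega]
            exact_mod_cast congrArg (Nat.cast : Nat -> Int) (pvW_step (by omega))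
          omega

theorem pvStartsB_spec : ∀ (k a : Nat) (n : Int),
    (pvStartsB n (pvFibList a k) = true) ↔
      ∃ p b, a ≤ p ∧ p ≤ b ∧ b < a + k ∧ (pvW p b : Int) = n := by
  intro k
  induction k with
  | zero =>
    intro a n
    refine iff_of_false (by simp [pvFibList, pvStartsB]) ?_
    rintro ⟨p, b, h1, h2, h3, _⟩
    omega
  | succ k ih =>
    intro a n
    rw [pvFibList_succ]
    simp only [pvStartsB]
    rw [← pvFibList_succ]
    by_cases hw : pvWinB n 0 (pvFibList a (k+1)) = true
    · rw [if_pos hw]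
      obtain ⟨j, hj, hsum⟩ := (pvWinB_spec (k+1) a 0 n).1 hw
      refine iff_of_true rfl ⟨a, a + j, le_refl _, by omega, by omega, by omega⟩
    · rw [if_neg hw]
      rw [ih (a+1) n]
      constructor
      · rintro ⟨p, b, h1, h2, h3, h4⟩
        exact ⟨p, b, by omega, h2, by omega, h4⟩
      · rintro ⟨p, b, h1, h2, h3, h4⟩
        by_cases hpa : p = a
        · subst hpa
          exfalso
          exact hw ((pvWinB_spec (k+1) p 0 n).2
            ⟨b - p, by omega, by rw [show p + (b - p) = b from by omega]; omega⟩)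
        · exact ⟨p, b, by omega, h2, by omega, h4⟩

theorem pvFibsLE_spec : ∀ (fuel i : Nat) (n : Int), 1 ≤ i → n < (Nat.fib (i + fuel) : Int) →
    ∃ K, pvFibsLE fuel n (Nat.fib i) (Nat.fib (i+1)) = pvFibList i K ∧
      n < (Nat.fib (i + K) : Int) := by
  intro fuel
  induction fuel with
  | zero =>
    intro i n hi hf
    exact ⟨0, by simp [pvFibsLE, pvFibList], by simpa using hf⟩
  | succ f ih =>
    intro i n hi hf
    simp only [pvFibsLE]
    by_cases hle : (Nat.fib i : Int) ≤ n
    · rw [if_pos hle]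
      have hf' : n < (Nat.fib (i + 1 + f) : Int) := by
        rw [show i + 1 + f = i + (f + 1) from by omega]
        exact hf
      obtain ⟨K, hlist, hK⟩ := ih (i+1) n (by omega) hf'
      have hfib : (Nat.fib i : Int) + (Nat.fib (i+1) : Int) = ((Nat.fib (i+1+1) : Nat) : Int) := by
        exact_mod_cast congrArg (Nat.cast : Nat -> Int) (Nat.fib_add_two (n := i)).symm
      refine ⟨K + 1, ?_, ?_⟩
      · rw [pvFibList_succ, hfib, hlist]
      · rw [show i + (K + 1) = i + 1 + K from by omega]
        exact hK
    · rw [if_neg hle]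
      exact ⟨0, by simp [pvFibList], by simpa using (by omega : n < (Nat.fib i : Int))⟩

theorem pvB_iff (n : Int) : (suma_podciagu_fib_alt n = true) ↔ pvHasWin n := by
  unfold suma_podciagu_fib_alt
  have hfuel : n < (Nat.fib (1 + (n.toNat + 1)) : Int) := by
    have h1 : (n.toNat : Int) < (Nat.fib (n.toNat + 2) : Int) := by
      exact_mod_cast pv_lt_fib_add_two n.toNat
    have h2 : Nat.fib (n.toNat + 2) ≤ Nat.fib (1 + (n.toNat + 1)) := Nat.fib_mono (by omega)
    have h2' : (Nat.fib (n.toNat + 2) : Int) ≤ (Nat.fib (1 + (n.toNat + 1)) : Int) := by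
      exact_mod_cast h2
    have h3 := Int.self_le_toNat n
    omega
  obtain ⟨K, hlist, hK⟩ := pvFibsLE_spec (n.toNat + 1) 1 n (le_refl _) hfuel
  rw [show pvFibsLE (n.toNat + 1) n 1 1 = pvFibList 1 K from hlist]
  rw [pvStartsB_spec K 1 n]
  constructor
  · rintro ⟨p, b, h1, h2, h3, h4⟩
    exact ⟨p, b, h1, h2, h4⟩
  · rintro ⟨a, b, ha, hab, hW⟩
    refine ⟨a, b, ha, hab, ?_, hW⟩
    by_contra hcon
    have h1 : Nat.fib (1 + K) ≤ Nat.fib b := Nat.fib_mono (by omega)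
    have h2 : Nat.fib b ≤ pvW a b := fib_le_pvW_right (b - a) a b (le_refl _) hab
    have h3 : (Nat.fib (1 + K) : Int) ≤ (pvW a b : Int) := by
      exact_mod_cast le_trans h1 h2
    omega

-- ===== VERDICT (by name: the statement is the Claim_ definition above) =====
theorem suma_podciagu_fib_spec : Claim_equal_suma_podciagu_fib := by
  intro n _
  unfold Spec_suma_podciagu_fib
  have hA := pvA_iff n
  have hB := pvB_iff n
  have hiff := (pvHasWin_iff n).symm
  cases h1 : suma_podciagu_fib n <;> cases h2 : suma_podciagu_fib_alt n <;> simp_all
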